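-- pv_equiv track=rewrite | github.com/Steven-ZhangJM/CS263_Final_Project | best_solution_gpt/p187.py | count_composites
-- ===== SOURCE A (Python) =====
-- def count_composites(limit):
--     primes = sieve(limit)
--     count = 0
--     for i in range(len(primes)):
--         for j in range(i, len(primes)):
--             if primes[i] * primes[j] < limit:
--                 count += 1
--             else:
--                 break
--     return count
--
-- def sieve(n):
--     prime = [True for _ in range(n+1)]
--     p = 2
--     while (p * p <= n):
--         if (prime[p] == True):
--             for i in range(p * p, n+1, p):
--                 prime[i] = False
--         p += 1
--     primes = []
--     for p in range(2, n):
--         if prime[p]: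
--             primes.append(p)
--     return primes
-- ===== SOURCE B (Python) =====
-- def count_composites(limit):
--     primes = sieve(limit)
--     count = 0
--     j = len(primes) - 1
--     for i in range(len(primes)):
--         while j >= i and primes[i] * primes[j] >= limit:
--             j -= 1
--         if j < i:
--             break
--         count += j - i + 1
--     return count
--
-- def sieve(n):
--     prime = [True for _ in range(n+1)]
--     p = 2
--     while (p * p <= n):
--         if (prime[p] == True):
--             for i in range(p * p, n+1, p):
--                 prime[i] = False
--         p += 1
--     primes = []
--     for p in range(2, n):
--         if prime[p]:
--             primes.append(p)
--     return primes
-- ===== Notes on version B (the rewrite author's own statement) =====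
-- stated objective: alternative
-- what changed: The nested pair scan with break is replaced by a single two-pointer sweep over the sorted primes: one shared upper pointer only ever moves down and each lower index contributes a whole contiguous range of partners at once (prime generation is unchanged and dominates the runtime, so no overall speed is claimed).
import Mathlib
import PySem

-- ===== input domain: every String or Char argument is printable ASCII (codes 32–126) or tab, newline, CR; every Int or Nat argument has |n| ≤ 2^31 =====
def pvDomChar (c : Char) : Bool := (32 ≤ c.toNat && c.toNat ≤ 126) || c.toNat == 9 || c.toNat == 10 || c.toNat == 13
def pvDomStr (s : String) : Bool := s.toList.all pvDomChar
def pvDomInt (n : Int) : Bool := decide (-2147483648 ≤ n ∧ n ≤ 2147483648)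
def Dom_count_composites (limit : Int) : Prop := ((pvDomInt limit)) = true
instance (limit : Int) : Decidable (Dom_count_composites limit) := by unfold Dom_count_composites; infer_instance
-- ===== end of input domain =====

-- B replaces A's nested pair scan (inner loop with break per i) by a single two-pointer sweep
-- over the sorted primes (same prime sieve; same return value; no speed claim).

-- ===== PORT A =====

-- shared accessor: primes[i]; Python's list is array-backed, so the port keeps it as an
-- Array. Exact for the indices both programs use (always 0 ≤ i < size; default unreachable).
def pvGet (ps : Array Int) (i : Int) : Int := ps.getD i.toNat 0

-- 'while p*p <= n: if prime[p] == True: for i in range(p*p, n+1, p): prime[i] = False; p += 1'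
-- (the Nat 'fuel' is a pure totality guard: the while-loop runs while p*p ≤ n, i.e. at most
--  n-1 times from p = 2, so fuel (n+1).toNat is never exhausted before the loop exits)
-- (the flag list is array-backed in Python too; 'prime[i] = False' writes and 'prime[p]'
--  reads are always in range 0 ≤ i ≤ n, where setIfInBounds/getD are exact)
def sieveMark (n : Int) (prime : Array Bool) (p : Int) : Nat → Array Bool
  | 0 => prime
  | fuel + 1 =>
    if p * p ≤ n then
      sieveMark n
        (if prime.getD p.toNat true == true then
          (PySem.List.pyRange (p * p) (n + 1) p).foldl
            (fun pr i => pr.setIfInBounds i.toNat false) prime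
        else prime)
        (p + 1) fuel
    else prime

def sieve (n : Int) : List Int :=
  let prime := sieveMark n (Array.replicate (n + 1).toNat true) 2 (n + 1).toNat
  (PySem.List.pyRange 2 n 1).foldl
    (fun acc p => if prime.getD p.toNat true then acc ++ [p] else acc) []

-- inner 'for j in range(i, len(primes)): if primes[i]*primes[j] < limit: count += 1 else: break'
def innerA (ps : Array Int) (L i : Int) (js : List Int) (c : Int) : Int :=
  match js with
  | [] => c
  | j :: rest => if pvGet ps i * pvGet ps j < L then innerA ps L i rest (c + 1) else c

def count_composites (limit : Int) : Int :=
  let primes := (sieve limit).toArray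
  (PySem.List.pyRange 0 (primes.size : Int) 1).foldl
    (fun count i => innerA primes limit i (PySem.List.pyRange i (primes.size : Int) 1) count) 0

-- ===== PORT B =====

-- 'while j >= i and primes[i]*primes[j] >= limit: j -= 1'
-- (the Nat 'fuel' is a pure totality guard: every actual call has 0 ≤ i, so the loop body
--  runs at most j+1 times and the fuel (j+1).toNat + 1 it is called with never runs out)
def bDrop (ps : Array Int) (L i j : Int) : Nat → Int
  | 0 => j
  | fuel + 1 =>
    if i ≤ j ∧ L ≤ pvGet ps i * pvGet ps j then bDrop ps L i (j - 1) fuel else j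

-- 'for i in range(len(primes)): <drop j>; if j < i: break; count += j - i + 1'
def bLoop (ps : Array Int) (L : Int) (is : List Int) (count j : Int) : Int :=
  match is with
  | [] => count
  | i :: rest =>
    let j' := bDrop ps L i j ((j + 1).toNat + 1)
    if j' < i then count else bLoop ps L rest (count + (j' - i + 1)) j'

def count_composites_alt (limit : Int) : Int :=
  let primes := (sieve limit).toArray
  bLoop primes limit (PySem.List.pyRange 0 (primes.size : Int) 1) 0 ((primes.size : Int) - 1)

-- ===== PRECONDITION & SPEC =====
def Spec_count_composites (limit : Int) (out : Int) : Prop := out = count_composites_alt limit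
instance (limit : Int) (out : Int) : Decidable (Spec_count_composites limit out) := by unfold Spec_count_composites; infer_instance

-- ===== CLAIM (what is proved, stated in full; the proofs are below) =====
def Claim_equal_count_composites : Prop := ∀ (limit : Int), Dom_count_composites limit → Spec_count_composites limit (count_composites limit)

-- ===== LEMMAS AND PROOFS =====

theorem sieve_eq_filter (n : Int) :
    sieve n = (PySem.List.pyRange 2 n 1).filter
      (fun p => (sieveMark n (Array.replicate (n + 1).toNat true) 2 (n + 1).toNat).getD p.toNat true) := by
  unfold sieve
  rw [PySem.List.foldl_append_if_eq_filter]
  rfl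

theorem sieve_sorted (n : Int) : (sieve n).Pairwise (· < ·) := by
  rw [sieve_eq_filter]
  exact (PySem.List.pairwise_lt_pyRange_one 2 n).filter _

theorem sieve_ge_two (n : Int) : ∀ x ∈ sieve n, 2 ≤ x := by
  intro x hx
  rw [sieve_eq_filter] at hx
  exact ((PySem.List.mem_pyRange_one).1 (List.mem_of_mem_filter hx)).1

theorem pvGet_eq_getElem (ps : Array Int) (t : Int) (h0 : 0 ≤ t) (h1 : t < (ps.size : Int)) :
    pvGet ps t = ps[t.toNat]'(by omega) := by
  simp [pvGet, Array.getD, (by omega : t.toNat < ps.size)]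

theorem pvGet_pos (ps : Array Int) (h2 : ∀ x ∈ ps.toList, 2 ≤ x) (t : Int)
    (h0 : 0 ≤ t) (h1 : t < (ps.size : Int)) : 0 ≤ pvGet ps t := by
  rw [pvGet_eq_getElem ps t h0 h1]
  have hm : ps[t.toNat]'(by omega) ∈ ps.toList := by
    simp only [List.mem_iff_getElem]
    exact ⟨t.toNat, by simpa using (by omega : t.toNat < ps.size), by simp⟩
  linarith [h2 _ hm]

theorem pvGet_mono (ps : Array Int) (hs : ps.toList.Pairwise (· < ·)) (s t : Int)
    (h0 : 0 ≤ s) (hst : s ≤ t) (ht : t < (ps.size : Int)) : pvGet ps s ≤ pvGet ps t := by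
  rcases eq_or_lt_of_le hst with rfl | hlt
  · exact le_refl _
  · have hsN : s.toNat < ps.toList.length := by simpa using (by omega : s.toNat < ps.size)
    have htN : t.toNat < ps.toList.length := by simpa using (by omega : t.toNat < ps.size)
    have hg := (List.pairwise_iff_getElem.1 hs) s.toNat t.toNat hsN htN (by omega)
    rw [pvGet_eq_getElem ps s h0 (by omega), pvGet_eq_getElem ps t (by omega) ht]
    simpa using le_of_lt hg

-- the while-loop of B: the pointer only goes down, everything above it is rejected,
-- and if it stops at j' ≥ i then (i, j') is a counted pair
theorem bDrop_spec (ps : Array Int) (L i : Int) (hi : 0 ≤ i) :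
    ∀ (fuel : Nat) (j : Int), (j + 1).toNat < fuel →
      (∀ t : Int, j < t → t < (ps.size : Int) → L ≤ pvGet ps i * pvGet ps t) →
      bDrop ps L i j fuel ≤ j ∧
      (∀ t : Int, bDrop ps L i j fuel < t → t < (ps.size : Int) → L ≤ pvGet ps i * pvGet ps t) ∧
      (i ≤ bDrop ps L i j fuel → pvGet ps i * pvGet ps (bDrop ps L i j fuel) < L) := by
  intro fuel
  induction fuel with
  | zero => intro j hf; omega
  | succ f ih =>
    intro j hf hinv
    simp only [bDrop]
    by_cases hc : i ≤ j ∧ L ≤ pvGet ps i * pvGet ps j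
    · simp only [if_pos hc]
      have hj0 : 0 ≤ j := le_trans hi hc.1
      have hinv' : ∀ t : Int, j - 1 < t → t < (ps.size : Int) →
          L ≤ pvGet ps i * pvGet ps t := by
        intro t ht1 ht2
        rcases (by omega : j < t ∨ t ≤ j) with h | h
        · exact hinv t h ht2
        · have : t = j := by omega
          subst this; exact hc.2
      have hrec := ih (j - 1) (by omega) hinv'
      exact ⟨by omega, hrec.2.1, hrec.2.2⟩
    · simp only [if_neg hc]
      refine ⟨le_refl _, hinv, fun hij => ?_⟩
      by_contra hge
      exact hc ⟨hij, by omega⟩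

-- A's inner loop (with break) counts exactly the indices a..j'
theorem innerA_eq (ps : Array Int) (L : Int) (hs : ps.toList.Pairwise (· < ·)) (h2 : ∀ x ∈ ps.toList, 2 ≤ x)
    (i j' : Int) (hi0 : 0 ≤ i) (hin : i < (ps.size : Int)) (hj'n : j' < (ps.size : Int))
    (hup : ∀ t : Int, j' < t → t < (ps.size : Int) → L ≤ pvGet ps i * pvGet ps t)
    (hok : i ≤ j' → pvGet ps i * pvGet ps j' < L) :
    ∀ (a c : Int), i ≤ a →
      innerA ps L i (PySem.List.pyRange a (ps.size : Int) 1) c = c + max 0 (j' + 1 - a) := by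
  intro a
  induction hk : ((ps.size : Int) - a).toNat using Nat.strong_induction_on generalizing a with
  | _ k ih =>
    intro c hia
    by_cases han : a < (ps.size : Int)
    · rw [PySem.List.pyRange_one_cons han]
      simp only [innerA]
      by_cases haj : a ≤ j'
      · have hcond : pvGet ps i * pvGet ps a < L :=
          lt_of_le_of_lt
            (mul_le_mul_of_nonneg_left
              (pvGet_mono ps hs a j' (by omega) haj hj'n)
              (pvGet_pos ps h2 i hi0 hin))
            (hok (by omega))
        rw [if_pos hcond,
            ih ((ps.size : Int) - (a + 1)).toNat (by omega) (a + 1) rfl (c + 1) (by omega)]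
        omega
      · rw [if_neg (not_lt.2 (hup a (by omega) han))]
        omega
    · rw [PySem.List.pyRange_one_eq_nil (by omega)]
      simp only [innerA]
      omega

-- once the break in B has fired, every remaining i of A contributes nothing
theorem innerA_tail (ps : Array Int) (L b : Int)
    (hsq : ∀ t : Int, b ≤ t → t < (ps.size : Int) → L ≤ pvGet ps t * pvGet ps t) :
    ∀ (a c : Int), b ≤ a →
      (PySem.List.pyRange a (ps.size : Int) 1).foldl
        (fun count i => innerA ps L i (PySem.List.pyRange i (ps.size : Int) 1) count) c = c := by
  intro a
  induction hk : ((ps.size : Int) - a).toNat using Nat.strong_induction_on generalizing a with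
  | _ k ih =>
    intro c hba
    by_cases han : a < (ps.size : Int)
    · rw [PySem.List.pyRange_one_cons han]
      rw [List.foldl_cons]
      have hstep : innerA ps L a (PySem.List.pyRange a (ps.size : Int) 1) c = c := by
        rw [PySem.List.pyRange_one_cons han]
        simp only [innerA]
        rw [if_neg (not_lt.2 (hsq a hba han))]
      rw [hstep]
      exact ih ((ps.size : Int) - (a + 1)).toNat (by omega) (a + 1) rfl c (by omega)
    · rw [PySem.List.pyRange_one_eq_nil (by omega)]
      rfl

-- the main loop correspondence: A's fold from index a equals B's pointer loop from (a, j)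
theorem outer_eq (ps : Array Int) (L : Int) (hs : ps.toList.Pairwise (· < ·)) (h2 : ∀ x ∈ ps.toList, 2 ≤ x) :
    ∀ (a j c : Int), 0 ≤ a → j < (ps.size : Int) →
      (∀ t : Int, j < t → t < (ps.size : Int) → L ≤ pvGet ps a * pvGet ps t) →
      (PySem.List.pyRange a (ps.size : Int) 1).foldl
        (fun count i => innerA ps L i (PySem.List.pyRange i (ps.size : Int) 1) count) c
        = bLoop ps L (PySem.List.pyRange a (ps.size : Int) 1) c j := by
  intro a
  induction hk : ((ps.size : Int) - a).toNat using Nat.strong_induction_on generalizing a with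
  | _ k ih =>
    intro j c ha0 hjn hinv
    by_cases han : a < (ps.size : Int)
    · obtain ⟨hle, hup, hok⟩ := bDrop_spec ps L a ha0 ((j + 1).toNat + 1) j (by omega) hinv
      rw [PySem.List.pyRange_one_cons han]
      rw [List.foldl_cons]
      simp only [bLoop]
      rw [innerA_eq ps L hs h2 a (bDrop ps L a j ((j + 1).toNat + 1)) ha0 han (by omega) hup hok a c le_rfl]
      by_cases hbr : bDrop ps L a j ((j + 1).toNat + 1) < a
      · rw [if_pos hbr]
        have hcc : c + max 0 (bDrop ps L a j ((j + 1).toNat + 1) + 1 - a) = c := by omega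
        rw [hcc]
        refine innerA_tail ps L (a + 1) ?_ (a + 1) c le_rfl
        intro t ht1 ht2
        have h1 := hup t (by omega) ht2
        have hmono := pvGet_mono ps hs a t ha0 (by omega) ht2
        have hpos := pvGet_pos ps h2 t (by omega) ht2
        nlinarith
      · rw [if_neg hbr]
        have hcc : c + max 0 (bDrop ps L a j ((j + 1).toNat + 1) + 1 - a) = c + (bDrop ps L a j ((j + 1).toNat + 1) - a + 1) := by omega
        rw [hcc]
        refine ih ((ps.size : Int) - (a + 1)).toNat (by omega) (a + 1) rfl
          (bDrop ps L a j ((j + 1).toNat + 1)) (c + (bDrop ps L a j ((j + 1).toNat + 1) - a + 1)) (by omega) (by omega) ?_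
        intro t ht1 ht2
        have h1 := hup t ht1 ht2
        have hmono := pvGet_mono ps hs a (a + 1) ha0 (by omega) (by omega)
        have hpos := pvGet_pos ps h2 t (by omega) ht2
        nlinarith
    · rw [PySem.List.pyRange_one_eq_nil (by omega)]
      rfl

theorem count_eq (limit : Int) : count_composites limit = count_composites_alt limit := by
  simp only [count_composites, count_composites_alt]
  refine outer_eq (sieve limit).toArray limit (by simpa using sieve_sorted limit)
    (by simpa using sieve_ge_two limit)
    0 (((sieve limit).toArray.size : Int) - 1) 0 le_rfl (by omega) ?_
  intro t h1 h2
  exact absurd h1 (by omega)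

-- ===== VERDICT (by name: the statement is the Claim_ definition above) =====
theorem count_composites_spec : Claim_equal_count_composites := by
  intro limit _
  unfold Spec_count_composites
  exact count_eq limit
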